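-- pv_equiv track=rewrite | github.com/ardakdemir/ner-data-selection | generate_vectors.py | map_ids_to_tokens
-- ===== SOURCE A (Python) =====
-- def map_ids_to_tokens(input_ids_per_word, idx=1):
--     token_map = []
--     for token in input_ids_per_word:
--         tokenoutput = []
--         for ids in token:
--             tokenoutput.append(idx)
--             idx += 1
--         token_map.append(tokenoutput)
--     return token_map
-- ===== SOURCE B (Python) =====
-- def map_ids_to_tokens(input_ids_per_word, idx=1):
--     # stage 1: materialize the entire id stream at once
--     flat = list(range(idx, idx + sum(len(t) for t in input_ids_per_word)))
--     # stage 2: carve the stream into per-token chunks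
--     token_map = []
--     for token in input_ids_per_word:
--         n = len(token)
--         token_map.append(flat[:n])
--         flat = flat[n:]
--     return token_map
-- ===== Notes on version B (the rewrite author's own statement) =====
-- stated objective: alternative
-- what changed: Two staged passes replace the single nested counting loop: first the whole id stream is materialized as one global range(idx, idx+total), then a second pass carves that flat list into per-token chunks by slicing off len(token) elements at a time; no counter is incremented per element.
import Mathlib
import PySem

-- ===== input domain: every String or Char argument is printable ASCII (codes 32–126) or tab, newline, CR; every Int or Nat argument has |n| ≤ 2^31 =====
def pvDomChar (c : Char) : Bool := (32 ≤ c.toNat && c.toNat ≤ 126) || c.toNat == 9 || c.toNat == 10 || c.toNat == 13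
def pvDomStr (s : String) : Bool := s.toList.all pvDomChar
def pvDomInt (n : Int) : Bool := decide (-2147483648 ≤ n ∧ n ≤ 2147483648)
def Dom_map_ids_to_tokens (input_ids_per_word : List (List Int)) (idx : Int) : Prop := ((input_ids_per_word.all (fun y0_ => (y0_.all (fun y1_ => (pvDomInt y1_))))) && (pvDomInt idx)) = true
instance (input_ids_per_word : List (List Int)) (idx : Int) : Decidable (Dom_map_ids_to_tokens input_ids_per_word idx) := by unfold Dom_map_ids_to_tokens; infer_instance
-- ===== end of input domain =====

-- B is a staged-passes rewrite: materialize the whole id stream as one flat range, then carve it into per-token chunks (objective: alternative).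
-- ===== PORT A =====
-- inner loop: for ids in token: tokenoutput.append(idx); idx += 1   (state = (tokenoutput, idx))
def map_ids_to_tokens_inner (token : List Int) (idx : Int) : List Int × Int :=
  token.foldl (fun (st : List Int × Int) _ => (st.1 ++ [st.2], st.2 + 1)) ([], idx)

-- outer loop: state = (token_map, idx)
def map_ids_to_tokens (input_ids_per_word : List (List Int)) (idx : Int) : List (List Int) :=
  (input_ids_per_word.foldl
    (fun (st : List (List Int) × Int) token =>
      let r := map_ids_to_tokens_inner token st.2
      (st.1 ++ [r.1], r.2))
    ([], idx)).1

-- ===== PORT B =====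
-- flat = list(range(idx, idx + sum(len(t) ...)));  then per token: append flat[:n]; flat = flat[n:]
def map_ids_to_tokens_alt (input_ids_per_word : List (List Int)) (idx : Int) : List (List Int) :=
  let flat := PySem.List.pyRange idx
      (idx + (input_ids_per_word.foldl (fun (s : Int) t => s + t.length) 0)) 1
  (input_ids_per_word.foldl
    (fun (st : List (List Int) × List Int) token =>
      (st.1 ++ [PySem.List.slice st.2 none (some (token.length : Int))],
       PySem.List.slice st.2 (some (token.length : Int)) none))
    ([], flat)).1

-- ===== PRECONDITION & SPEC =====
def Spec_map_ids_to_tokens (input_ids_per_word : List (List Int)) (idx : Int) (out : List (List Int)) : Prop := out = map_ids_to_tokens_alt input_ids_per_word idx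
instance (input_ids_per_word : List (List Int)) (idx : Int) (out : List (List Int)) : Decidable (Spec_map_ids_to_tokens input_ids_per_word idx out) := by unfold Spec_map_ids_to_tokens; infer_instance

-- ===== CLAIM (what is proved, stated in full; the proofs are below) =====
def Claim_equal_map_ids_to_tokens : Prop := ∀ (input_ids_per_word : List (List Int)) (idx : Int), Dom_map_ids_to_tokens input_ids_per_word idx → Spec_map_ids_to_tokens input_ids_per_word idx (map_ids_to_tokens input_ids_per_word idx)

-- ===== LEMMAS AND PROOFS =====
-- intermediate form both sides are reduced to
def midChunks : List (List Int) → Int → List (List Int)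
  | [], _ => []
  | token :: rest, s =>
      PySem.List.pyRange s (s + token.length) 1 :: midChunks rest (s + token.length)

-- A's inner loop produces exactly range(idx, idx+len) appended to the accumulator, plus the advanced counter.
theorem inner_foldl_eq (token : List Int) (acc : List Int) (idx : Int) :
    token.foldl (fun (st : List Int × Int) _ => (st.1 ++ [st.2], st.2 + 1)) (acc, idx)
      = (acc ++ PySem.List.pyRange idx (idx + token.length) 1, idx + token.length) := by
  induction token generalizing acc idx with
  | nil => simp
  | cons a t ih =>
      rw [List.foldl_cons, ih]
      have hlt : idx < idx + ((a :: t).length : Int) := by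
        simp only [List.length_cons]; push_cast; omega
      have harg : idx + 1 + (t.length : Int) = idx + ((a :: t).length : Int) := by
        simp only [List.length_cons]; push_cast; ring
      rw [PySem.List.pyRange_one_cons hlt]
      simp [harg]

theorem inner_eq (token : List Int) (idx : Int) :
    map_ids_to_tokens_inner token idx =
      (PySem.List.pyRange idx (idx + token.length) 1, idx + token.length) := by
  simpa using inner_foldl_eq token [] idx

-- A's outer fold with any accumulator prefix equals that prefix ++ midChunks.
theorem a_outer_eq (toks : List (List Int)) (acc : List (List Int)) (idx : Int) :
    (toks.foldl
      (fun (st : List (List Int) × Int) token =>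
        let r := map_ids_to_tokens_inner token st.2
        (st.1 ++ [r.1], r.2)) (acc, idx)).1
      = acc ++ midChunks toks idx := by
  induction toks generalizing acc idx with
  | nil => simp [midChunks]
  | cons t rest ih =>
      rw [List.foldl_cons]
      show (List.foldl _ (acc ++ [(map_ids_to_tokens_inner t idx).1], (map_ids_to_tokens_inner t idx).2) rest).1 = _
      rw [inner_eq, ih, midChunks]
      simp

-- total length as a fold equals the sum of lengths, with any initial offset
theorem len_foldl_eq (toks : List (List Int)) (s : Int) :
    toks.foldl (fun (a : Int) t => a + t.length) s = s + (toks.map (fun t => (t.length : Int))).sum := by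
  induction toks generalizing s with
  | nil => simp
  | cons t rest ih => simp [List.foldl_cons, ih]; ring

-- B's chunking fold, applied to the exact flat range, yields midChunks.
theorem b_chunk_eq (toks : List (List Int)) (acc : List (List Int)) (s : Int) :
    (toks.foldl
      (fun (st : List (List Int) × List Int) token =>
        (st.1 ++ [PySem.List.slice st.2 none (some (token.length : Int))],
         PySem.List.slice st.2 (some (token.length : Int)) none))
      (acc, PySem.List.pyRange s (s + (toks.map (fun t => (t.length : Int))).sum) 1)).1
      = acc ++ midChunks toks s := by
  induction toks generalizing acc s with
  | nil => simp [midChunks]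
  | cons t rest ih =>
      have hnn : (0 : Int) ≤ (rest.map (fun t => (t.length : Int))).sum := by
        apply List.sum_nonneg; intro x hx
        simp only [List.mem_map] at hx
        obtain ⟨y, _, rfl⟩ := hx; positivity
      have hsplit : PySem.List.pyRange s (s + ((t :: rest).map (fun t => (t.length : Int))).sum) 1
          = PySem.List.pyRange s (s + t.length) 1
            ++ PySem.List.pyRange (s + t.length) (s + ((t :: rest).map (fun t => (t.length : Int))).sum) 1 := by
        apply PySem.List.pyRange_one_append
        · omega
        · simp only [List.map_cons, List.sum_cons]; omega
      have hlen : (PySem.List.pyRange s (s + t.length) 1).length = t.length := by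
        rw [PySem.List.length_pyRange_one]; omega
      have htake : PySem.List.slice
          (PySem.List.pyRange s (s + ((t :: rest).map (fun t => (t.length : Int))).sum) 1)
          none (some (t.length : Int)) = PySem.List.pyRange s (s + t.length) 1 := by
        rw [PySem.List.slice_to_natCast, hsplit, List.take_append_of_le_length (by omega), List.take_of_length_le (by omega)]
      have hdrop : PySem.List.slice
          (PySem.List.pyRange s (s + ((t :: rest).map (fun t => (t.length : Int))).sum) 1)
          (some (t.length : Int)) none
          = PySem.List.pyRange (s + t.length) (s + t.length + (rest.map (fun t => (t.length : Int))).sum) 1 := by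
        rw [PySem.List.slice_from_natCast, hsplit, List.drop_append_of_le_length (by omega), List.drop_of_length_le (by omega)]
        simp only [List.map_cons, List.sum_cons, List.nil_append]
        congr 1; ring
      rw [List.foldl_cons]
      show (List.foldl _ (acc ++ [PySem.List.slice _ none _], PySem.List.slice _ _ none) rest).1 = _
      rw [htake, hdrop, ih, midChunks]
      simp

-- ===== VERDICT (by name: the statement is the Claim_ definition above) =====
theorem map_ids_to_tokens_spec : Claim_equal_map_ids_to_tokens := by
  intro xs idx _
  unfold Spec_map_ids_to_tokens map_ids_to_tokens map_ids_to_tokens_alt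
  rw [a_outer_eq, len_foldl_eq]
  simp only [zero_add]
  rw [b_chunk_eq]
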